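-- pv_equiv track=rewrite | github.com/default-007/sms | src/students/utils.py | sanitize_student_data
-- ===== SOURCE A (Python) =====
-- def sanitize_student_data(data):
--     """
--     Sanitize student data input
--
--     Args:
--         data (dict): Student data dictionary
--
--     Returns:
--         dict: Sanitized data
--     """
--     sanitized = {}
--
--     # Text fields that need stripping and title case
--     text_fields = [
--         "first_name",
--         "last_name",
--         "emergency_contact_name",
--         "emergency_contact_relationship",
--     ]
--     for field in text_fields:
--         if field in data and data[field]:
--             sanitized[field] = data[field].strip().title()
--
--     # Fields that need stripping only
--     strip_fields = [
--         "email",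
--         "phone_number",
--         "admission_number",
--         "roll_number",
--         "previous_school",
--     ]
--     for field in strip_fields:
--         if field in data and data[field]:
--             sanitized[field] = data[field].strip()
--
--     # Email to lowercase
--     if "email" in sanitized and sanitized["email"]:
--         sanitized["email"] = sanitized["email"].lower()
--
--     # Admission number to uppercase
--     if "admission_number" in sanitized and sanitized["admission_number"]:
--         sanitized["admission_number"] = sanitized["admission_number"].upper()
--
--     # Text areas that need stripping
--     textarea_fields = ["address", "medical_conditions"]
--     for field in textarea_fields:
--         if field in data and data[field]:
--             sanitized[field] = data[field].strip()
--
--     # Copy other fields as-is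
--     for field, value in data.items():
--         if field not in sanitized:
--             sanitized[field] = value
--
--     return sanitized
-- ===== SOURCE B (Python) =====
-- # Single pass over the input in input order: treated values land in fixed
-- # positional slots, everything else queues up; the output is then emitted
-- # slot-by-slot followed by the queue.
--
-- _ORDER = [
--     "first_name", "last_name", "emergency_contact_name",
--     "emergency_contact_relationship", "email", "phone_number",
--     "admission_number", "roll_number", "previous_school",
--     "address", "medical_conditions",
-- ]
-- _KINDS = ["t", "t", "t", "t", "l", "s", "u", "s", "s", "s", "s"]
-- _SLOT = {f: i for i, f in enumerate(_ORDER)}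
--
--
-- def sanitize_student_data(data):
--     """
--     Sanitize student data input
--
--     Args:
--         data (dict): Student data dictionary
--
--     Returns:
--         dict: Sanitized data
--     """
--     slots = [None] * len(_ORDER)
--     rest = []
--     for field, value in data.items():
--         i = _SLOT.get(field)
--         if i is None or not value:
--             rest.append((field, value))
--         else:
--             s = value.strip()
--             k = _KINDS[i]
--             slots[i] = (s.title() if k == "t" else
--                         s.lower() if k == "l" else
--                         s.upper() if k == "u" else s)
--     out = {}
--     for i, s in enumerate(slots):
--         if s is not None:
--             out[_ORDER[i]] = s
--     for field, value in rest:
--         out[field] = value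
--     return out
-- ===== Notes on version B (the rewrite author's own statement) =====
-- stated objective: alternative
-- what changed: A makes four passes over fixed field-name lists plus two re-touch patches on a mutable dict; B makes one pass over the input items in input order, routing each treated value into a fixed positional slot array (transform chosen by a slot kind code) and queueing untreated pairs, then emits slots in order followed by the queue.
import Mathlib
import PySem

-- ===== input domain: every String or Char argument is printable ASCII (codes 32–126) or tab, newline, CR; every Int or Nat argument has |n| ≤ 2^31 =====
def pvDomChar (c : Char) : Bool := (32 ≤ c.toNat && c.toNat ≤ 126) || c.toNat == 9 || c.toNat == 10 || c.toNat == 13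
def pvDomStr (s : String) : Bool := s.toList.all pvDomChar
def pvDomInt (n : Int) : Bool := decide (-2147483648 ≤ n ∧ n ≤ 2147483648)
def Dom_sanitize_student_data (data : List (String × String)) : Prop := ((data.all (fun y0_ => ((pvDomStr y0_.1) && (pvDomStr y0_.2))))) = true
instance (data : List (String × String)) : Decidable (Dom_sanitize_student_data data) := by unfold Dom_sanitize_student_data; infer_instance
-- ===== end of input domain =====

-- B replaces A's four passes over fixed field-name lists plus two re-touch patches
-- by ONE pass over the input items in input order, routing each treated value into a
-- fixed positional slot array and queueing the untreated pairs, then emitting the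
-- slots in order followed by the queue (objective: alternative; equal cost).

-- ===== PORT A =====
-- str.title(), hand-ported (PySem has no title): exact on the ASCII domain —
-- a letter following a non-letter is uppercased, any other letter lowercased.
def pyTitleChars : List Char → Bool → List Char
  | [], _ => []
  | c :: cs, prevAlpha =>
    (if PySem.Chars.isalpha c then
        (if prevAlpha then PySem.Chars.lowerChar c else PySem.Chars.upperChar c)
      else c) :: pyTitleChars cs (PySem.Chars.isalpha c)

def pyTitle (s : String) : String := String.ofList (pyTitleChars s.toList false)

def titleFields : List String :=
  ["first_name", "last_name", "emergency_contact_name", "emergency_contact_relationship"]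
def aStripFields : List String :=
  ["email", "phone_number", "admission_number", "roll_number", "previous_school"]
def aTextareaFields : List String := ["address", "medical_conditions"]

-- 'if field in data and data[field]: sanitized[field] = t(data[field])', the body of A's three loops
def aFieldStep (d : PySem.Dict String String) (t : String → String)
    (s : PySem.Dict String String) (f : String) : PySem.Dict String String :=
  match d.get? f with
  | some v => if v ≠ "" then s.insert f (t v) else s
  | none => s

def sanitize_student_data (data : List (String × String)) : List (String × String) :=
  let d := PySem.Dict.ofList data
  let s1 := titleFields.foldl
      (aFieldStep d (fun v => pyTitle (PySem.Str.strip v))) PySem.Dict.empty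
  let s2 := aStripFields.foldl (aFieldStep d PySem.Str.strip) s1
  let s3 := match s2.get? "email" with
    | some v => if v ≠ "" then s2.insert "email" (PySem.Str.lower v) else s2
    | none => s2
  let s4 := match s3.get? "admission_number" with
    | some v => if v ≠ "" then s3.insert "admission_number" (PySem.Str.upper v) else s3
    | none => s3
  let s5 := aTextareaFields.foldl (aFieldStep d PySem.Str.strip) s4
  let s6 := d.items.foldl (fun s p => if s.contains p.1 then s else s.insert p.1 p.2) s5
  s6.items

-- ===== PORT B =====
-- _ORDER, _KINDS, _SLOT of Source B
def bOrder : List String :=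
  ["first_name", "last_name", "emergency_contact_name", "emergency_contact_relationship",
   "email", "phone_number", "admission_number", "roll_number", "previous_school",
   "address", "medical_conditions"]
def bKinds : List String := ["t", "t", "t", "t", "l", "s", "u", "s", "s", "s", "s"]
def bSlot : PySem.Dict String Int :=
  PySem.Dict.ofList ((PySem.List.enumerate bOrder).map (fun p => (p.2, p.1)))

-- the value stored in slot i for raw value v: 's.title() if k == "t" else …'
def bTr (i : Int) (v : String) : String :=
  let s := PySem.Str.strip v
  let k := (PySem.List.pyGet? bKinds i).getD ""   -- i is a valid index of _KINDS whenever used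
  if k = "t" then pyTitle s
  else if k = "l" then PySem.Str.lower s
  else if k = "u" then PySem.Str.upper s
  else s

-- body of B's first loop over data.items()
def bStep (acc : List (Option String) × List (String × String)) (p : String × String) :
    List (Option String) × List (String × String) :=
  match bSlot.get? p.1 with
  | none => (acc.1, acc.2 ++ [p])
  | some i =>
    if p.2 = "" then (acc.1, acc.2 ++ [p])
    else (acc.1.set i.toNat (some (bTr i p.2)), acc.2)   -- slots[i] = …; here 0 ≤ i < len(_ORDER)

def sanitize_student_data_alt (data : List (String × String)) : List (String × String) :=
  let d := PySem.Dict.ofList data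
  let sr := d.items.foldl bStep (List.replicate bOrder.length none, [])
  let out := (PySem.List.enumerate sr.1).foldl
      (fun o q => match q.2 with
        | some s => o.insert ((PySem.List.pyGet? bOrder q.1).getD "") s   -- out[_ORDER[i]] = s; q.1 < len(_ORDER)
        | none => o) PySem.Dict.empty
  (sr.2.foldl (fun o p => o.insert p.1 p.2) out).items

-- ===== PRECONDITION & SPEC =====
def Spec_sanitize_student_data (data : List (String × String)) (out : List (String × String)) : Prop := out = sanitize_student_data_alt data
instance (data : List (String × String)) (out : List (String × String)) : Decidable (Spec_sanitize_student_data data out) := by unfold Spec_sanitize_student_data; infer_instance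

-- ===== CLAIM (what is proved, stated in full; the proofs are below) =====
def Claim_equal_sanitize_student_data : Prop := ∀ (data : List (String × String)), Dom_sanitize_student_data data → Spec_sanitize_student_data data (sanitize_student_data data)

-- ===== LEMMAS AND PROOFS =====

-- the per-field transform both programs amount to, and the pair a field contributes
def pvTr (f : String) (v : String) : String :=
  if f ∈ titleFields then pyTitle (PySem.Str.strip v)
  else if f = "email" then PySem.Str.lower (PySem.Str.strip v)
  else if f = "admission_number" then PySem.Str.upper (PySem.Str.strip v)
  else PySem.Str.strip v

def pvCell (d : PySem.Dict String String) (t : String → String → String) (f : String) :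
    Option (String × String) :=
  (d.get? f).bind (fun v => if v ≠ "" then some (f, t f v) else none)

-- the canonical result both programs produce: treated fields in _ORDER order, then the rest
def pvTreated (d : PySem.Dict String String) : List (String × String) :=
  bOrder.filterMap (pvCell d pvTr)
def pvRest (d : PySem.Dict String String) : List (String × String) :=
  d.items.filter (fun p => !((pvTreated d).any (fun q => q.1 == p.1)))

theorem pvCell_congr (d : PySem.Dict String String) {t1 t2 : String → String → String}
    (f : String) (h : t1 f = t2 f) : pvCell d t1 f = pvCell d t2 f := by
  simp [pvCell, h]

theorem pvCell_eq_some (d : PySem.Dict String String) (t : String → String → String)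
    {f : String} {p : String × String} (h : pvCell d t f = some p) : p.1 = f := by
  unfold pvCell at h
  cases hv : d.get? f with
  | none => simp [hv] at h
  | some v =>
    simp [hv] at h
    rcases h with ⟨_, h⟩
    simp [← h]

theorem pvKeys_sublist (d : PySem.Dict String String) (t : String → String → String)
    (fs : List String) :
    ((fs.filterMap (pvCell d t)).map Prod.fst).Sublist fs := by
  induction fs with
  | nil => simp
  | cons f fs ih =>
    rw [List.filterMap_cons]
    cases hc : pvCell d t f with
    | none => exact ih.cons f
    | some p =>
      rw [List.map_cons, pvCell_eq_some d t hc]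
      exact ih.cons₂ f

theorem pvFold_items (d : PySem.Dict String String) (t : String → String)
    (fs : List String) (s : PySem.Dict String String)
    (hnd : fs.Nodup) (hfresh : ∀ f ∈ fs, s.contains f = false) :
    (fs.foldl (aFieldStep d t) s).items
      = s.items ++ fs.filterMap (pvCell d (fun _ => t)) := by
  induction fs generalizing s with
  | nil => simp
  | cons f fs ih =>
    rw [List.foldl_cons, List.filterMap_cons]
    have hndt := (List.nodup_cons.mp hnd).2
    have hfns : f ∉ fs := (List.nodup_cons.mp hnd).1
    cases hv : d.get? f with
    | none =>
      have hstep : aFieldStep d t s f = s := by simp [aFieldStep, hv]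
      have hcell : pvCell d (fun _ => t) f = none := by simp [pvCell, hv]
      rw [hstep, hcell]
      exact ih _ hndt (fun g hg => hfresh g (List.mem_cons_of_mem f hg))
    | some v =>
      by_cases he : v = ""
      · have hstep : aFieldStep d t s f = s := by simp [aFieldStep, hv, he]
        have hcell : pvCell d (fun _ => t) f = none := by simp [pvCell, hv, he]
        rw [hstep, hcell]
        exact ih _ hndt (fun g hg => hfresh g (List.mem_cons_of_mem f hg))
      · have hstep : aFieldStep d t s f = s.insert f (t v) := by
          simp [aFieldStep, hv, he]
        have hcell : pvCell d (fun _ => t) f = some (f, t v) := by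
          simp [pvCell, hv, he]
        have hfresh' : ∀ g ∈ fs, (s.insert f (t v)).contains g = false := by
          intro g hg
          rw [PySem.Dict.contains_insert]
          have : g ≠ f := fun h => hfns (h ▸ hg)
          simp [this, hfresh g (List.mem_cons_of_mem f hg)]
        rw [hstep, hcell, ih _ hndt hfresh',
          PySem.Dict.items_insert_of_not_contains s (t v) (hfresh f (List.mem_cons_self ..))]
        simp

theorem pvFold_get? (d : PySem.Dict String String) (t : String → String)
    (fs : List String) (s : PySem.Dict String String) (k : String) (hnd : fs.Nodup) :
    (fs.foldl (aFieldStep d t) s).get? k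
      = if k ∈ fs then
          (match d.get? k with
           | some v => if v ≠ "" then some (t v) else s.get? k
           | none => s.get? k)
        else s.get? k := by
  induction fs generalizing s with
  | nil => simp
  | cons f fs ih =>
    have hndt := (List.nodup_cons.mp hnd).2
    have hfns : f ∉ fs := (List.nodup_cons.mp hnd).1
    rw [List.foldl_cons]
    by_cases hk : k = f
    · subst hk
      rw [ih _ hndt, if_neg hfns]
      have hstep : ∀ s' : PySem.Dict String String, (aFieldStep d t s' k).get? k
          = (match d.get? k with
             | some v => if v ≠ "" then some (t v) else s'.get? k
             | none => s'.get? k) := by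
        intro s'
        cases hv : d.get? k with
        | none => simp [aFieldStep, hv]
        | some v =>
          by_cases he : v = "" <;>
            simp [aFieldStep, hv, he, PySem.Dict.get?_insert_self]
      simp [hstep, List.mem_cons]
    · have hstep : (aFieldStep d t s f).get? k = s.get? k := by
        cases hv : d.get? f with
        | none => simp [aFieldStep, hv]
        | some v =>
          by_cases he : v = "" <;>
            simp [aFieldStep, hv, he, PySem.Dict.get?_insert_of_ne _ _ hk]
      rw [ih _ hndt, hstep]
      simp [List.mem_cons, hk]

theorem pvDictFold_items (l : List (String × String)) (s : PySem.Dict String String)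
    (hnd : (l.map Prod.fst).Nodup) :
    (l.foldl (fun s p => if s.contains p.1 then s else s.insert p.1 p.2) s).items
      = s.items ++ l.filter (fun p => !s.contains p.1) := by
  induction l generalizing s with
  | nil => simp
  | cons p l ih =>
    rw [List.map_cons, List.nodup_cons] at hnd
    rw [List.foldl_cons, List.filter_cons]
    by_cases hc : s.contains p.1
    · simp only [hc, if_true, Bool.not_true, Bool.false_eq_true, if_false]
      exact ih s hnd.2
    · have hc' : s.contains p.1 = false := by simpa using hc
      simp only [hc', Bool.false_eq_true, if_false, Bool.not_false, if_true]
      rw [ih _ hnd.2, PySem.Dict.items_insert_of_not_contains s p.2 hc']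
      have hfilter : l.filter (fun q => !(s.insert p.1 p.2).contains q.1)
          = l.filter (fun q => !s.contains q.1) := by
        apply List.filter_congr
        intro q hq
        have : q.1 ≠ p.1 := by
          intro h
          exact hnd.1 (h ▸ List.mem_map_of_mem hq)
        rw [PySem.Dict.contains_insert]
        simp [this]
      rw [hfilter]
      simp

theorem pvNotMem_of_sublist {fs : List String} {ks : List String} {k : String}
    (hsub : ks.Sublist fs) (hk : k ∉ fs) : k ∉ ks := fun h => hk (hsub.mem h)

-- the per-field transforms accumulated by A's successive passes
def pvT1 : String → String → String := fun f v =>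
  if f ∈ titleFields then pyTitle (PySem.Str.strip v) else PySem.Str.strip v
def pvT2 : String → String → String := fun f v =>
  if f = "email" then PySem.Str.lower (PySem.Str.strip v) else pvT1 f v
def pvT3 : String → String → String := fun f v =>
  if f = "admission_number" then PySem.Str.upper (PySem.Str.strip v) else pvT2 f v

theorem pvContains_false_of_not_mem_keys (s : PySem.Dict String String) (k : String)
    (h : k ∉ s.keys) : s.contains k = false := by
  rw [Bool.eq_false_iff]
  intro hc
  exact h ((PySem.Dict.contains_iff_mem_keys s k).mp hc)

-- A computes the canonical result
theorem pvA_eq_canonical (data : List (String × String)) :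
    sanitize_student_data data
      = pvTreated (PySem.Dict.ofList data) ++ pvRest (PySem.Dict.ofList data) := by
  simp only [sanitize_student_data, pvTreated, pvRest]
  set d := PySem.Dict.ofList data with hd
  have hnd : d.keys.Nodup := PySem.Dict.nodup_keys_ofList data
  set T : String → String := fun v => pyTitle (PySem.Str.strip v) with hT
  set s1 := titleFields.foldl (aFieldStep d T) PySem.Dict.empty with hs1def
  set s2 := aStripFields.foldl (aFieldStep d PySem.Str.strip) s1 with hs2def
  -- phase 1
  have h1 : s1.items = titleFields.filterMap (pvCell d (fun _ => T)) := by
    rw [hs1def, pvFold_items d T titleFields PySem.Dict.empty (by decide)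
      (fun f _ => PySem.Dict.contains_empty f)]
    have he : (PySem.Dict.empty : PySem.Dict String String).items = [] := rfl
    simp [he]
  have hk1 : s1.keys = (titleFields.filterMap (pvCell d (fun _ => T))).map Prod.fst := by
    simp [PySem.Dict.keys, h1]
  -- phase 2
  have h2 : s2.items = titleFields.filterMap (pvCell d (fun _ => T))
      ++ aStripFields.filterMap (pvCell d (fun _ => PySem.Str.strip)) := by
    rw [hs2def, pvFold_items d PySem.Str.strip aStripFields s1 (by decide) ?_, h1]
    intro f hf
    apply pvContains_false_of_not_mem_keys
    rw [hk1]
    refine pvNotMem_of_sublist (pvKeys_sublist d _ titleFields) ?_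
    fin_cases hf <;> decide
  have hs2 : s2.items = (titleFields ++ aStripFields).filterMap (pvCell d pvT1) := by
    have hA : titleFields.filterMap (pvCell d (fun _ => T)) = titleFields.filterMap (pvCell d pvT1) :=
      List.filterMap_congr (fun f hf => pvCell_congr d f
        (by fin_cases hf <;> (funext v; simp [hT, pvT1, titleFields])))
    have hB : aStripFields.filterMap (pvCell d (fun _ => PySem.Str.strip)) = aStripFields.filterMap (pvCell d pvT1) :=
      List.filterMap_congr (fun f hf => pvCell_congr d f
        (by fin_cases hf <;> (funext v; simp [pvT1, titleFields])))
    rw [h2, hA, hB, ← List.filterMap_append]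
  -- s1 lookups of the two re-touched fields
  have hs1E : s1.get? "email" = none := by
    apply PySem.Dict.get?_eq_none_iff_not_mem_keys s1 "email" |>.mpr
    rw [hk1]
    exact pvNotMem_of_sublist (pvKeys_sublist d _ titleFields) (by decide)
  have hs1A : s1.get? "admission_number" = none := by
    apply PySem.Dict.get?_eq_none_iff_not_mem_keys s1 "admission_number" |>.mpr
    rw [hk1]
    exact pvNotMem_of_sublist (pvKeys_sublist d _ titleFields) (by decide)
  have hgetE : s2.get? "email" =
      (match d.get? "email" with
       | some v => if v ≠ "" then some (PySem.Str.strip v) else none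
       | none => none) := by
    rw [hs2def, pvFold_get? d PySem.Str.strip aStripFields s1 "email" (by decide)]
    rw [if_pos (by decide)]
    cases d.get? "email" with
    | none => simpa using hs1E
    | some v => by_cases he : v = "" <;> simp [he, hs1E]
  have hgetA : s2.get? "admission_number" =
      (match d.get? "admission_number" with
       | some v => if v ≠ "" then some (PySem.Str.strip v) else none
       | none => none) := by
    rw [hs2def, pvFold_get? d PySem.Str.strip aStripFields s1 "admission_number" (by decide)]
    rw [if_pos (by decide)]
    cases d.get? "admission_number" with
    | none => simpa using hs1A
    | some v => by_cases he : v = "" <;> simp [he, hs1A]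
  -- phase 3 (email re-touch)
  set s3 := (match s2.get? "email" with
    | some v => if v ≠ "" then s2.insert "email" (PySem.Str.lower v) else s2
    | none => s2) with hs3def
  have hlow : PySem.Str.lower "" = "" := by decide
  have h3 : s3.items = (titleFields ++ aStripFields).filterMap (pvCell d pvT2)
      ∧ s3.get? "admission_number" = s2.get? "admission_number" := by
    rw [hs3def, hgetE]
    cases hE : d.get? "email" with
    | none =>
      refine ⟨?_, rfl⟩
      rw [hs2]
      refine List.filterMap_congr (fun f hf => ?_)
      fin_cases hf <;> simp [pvCell, pvT1, pvT2, titleFields, hE]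
    | some v0 =>
      by_cases hv0 : v0 = ""
      · refine ⟨?_, by simp [hv0]⟩
        simp only [hv0, ne_eq, not_true_eq_false, if_false]
        rw [hs2]
        refine List.filterMap_congr (fun f hf => ?_)
        fin_cases hf <;> simp [pvCell, pvT1, pvT2, titleFields, hE, hv0]
      · by_cases hsv : PySem.Str.strip v0 = ""
        · refine ⟨?_, by simp [hv0, hsv]⟩
          simp only [hv0, ne_eq, not_false_eq_true, if_true, hsv, not_true_eq_false, if_false]
          rw [hs2]
          refine List.filterMap_congr (fun f hf => ?_)
          fin_cases hf <;> simp [pvCell, pvT1, pvT2, titleFields, hE, hv0, hsv, hlow]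
        · have hcon : s2.contains "email" = true := by
            rw [PySem.Dict.contains_eq_isSome_get?, hgetE, hE]
            simp [hv0]
          simp only [hv0, ne_eq, not_false_eq_true, if_true, hsv, if_true]
          constructor
          · rw [PySem.Dict.items_insert_of_contains s2 _ hcon, hs2, List.map_filterMap]
            refine List.filterMap_congr (fun f hf => ?_)
            fin_cases hf <;>
              simp [pvCell, pvT1, pvT2, titleFields, hE, hv0, Option.map_bind, apply_ite]
          · exact PySem.Dict.get?_insert_of_ne s2 _ (by decide)
  -- phase 4 (admission_number re-touch)
  set s4 := (match s3.get? "admission_number" with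
    | some v => if v ≠ "" then s3.insert "admission_number" (PySem.Str.upper v) else s3
    | none => s3) with hs4def
  have hupp : PySem.Str.upper "" = "" := by decide
  have h4 : s4.items = (titleFields ++ aStripFields).filterMap (pvCell d pvT3) := by
    rw [hs4def, h3.2, hgetA]
    cases hA : d.get? "admission_number" with
    | none =>
      rw [h3.1]
      refine List.filterMap_congr (fun f hf => ?_)
      fin_cases hf <;> simp [pvCell, pvT1, pvT2, pvT3, titleFields, hA]
    | some v0 =>
      by_cases hv0 : v0 = ""
      · simp only [hv0, ne_eq, not_true_eq_false, if_false]
        rw [h3.1]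
        refine List.filterMap_congr (fun f hf => ?_)
        fin_cases hf <;> simp [pvCell, pvT1, pvT2, pvT3, titleFields, hA, hv0]
      · by_cases hsv : PySem.Str.strip v0 = ""
        · simp only [hv0, ne_eq, not_false_eq_true, if_true, hsv, not_true_eq_false, if_false]
          rw [h3.1]
          refine List.filterMap_congr (fun f hf => ?_)
          fin_cases hf <;> simp [pvCell, pvT1, pvT2, pvT3, titleFields, hA, hv0, hsv, hupp]
        · have hcon : s3.contains "admission_number" = true := by
            rw [PySem.Dict.contains_eq_isSome_get?, h3.2, hgetA, hA]
            simp [hv0]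
          simp only [hv0, ne_eq, not_false_eq_true, if_true, hsv, if_true]
          rw [PySem.Dict.items_insert_of_contains s3 _ hcon, h3.1, List.map_filterMap]
          refine List.filterMap_congr (fun f hf => ?_)
          fin_cases hf <;>
            simp [pvCell, pvT1, pvT2, pvT3, titleFields, hA, hv0, Option.map_bind, apply_ite]
  -- phase 5 (text areas)
  set s5 := aTextareaFields.foldl (aFieldStep d PySem.Str.strip) s4 with hs5def
  have hk4 : s4.keys = ((titleFields ++ aStripFields).filterMap (pvCell d pvT3)).map Prod.fst := by
    simp [PySem.Dict.keys, h4]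
  have h5 : s5.items = bOrder.filterMap (pvCell d pvTr) := by
    rw [hs5def, pvFold_items d PySem.Str.strip aTextareaFields s4 (by decide) ?_, h4]
    · have hbf : bOrder = (titleFields ++ aStripFields) ++ aTextareaFields := by decide
      have hA : (titleFields ++ aStripFields).filterMap (pvCell d pvT3)
          = (titleFields ++ aStripFields).filterMap (pvCell d pvTr) :=
        List.filterMap_congr (fun f hf => pvCell_congr d f
          (by fin_cases hf <;> (funext v; simp [pvT1, pvT2, pvT3, pvTr, titleFields])))
      have hB : aTextareaFields.filterMap (pvCell d (fun _ => PySem.Str.strip))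
          = aTextareaFields.filterMap (pvCell d pvTr) :=
        List.filterMap_congr (fun f hf => pvCell_congr d f
          (by fin_cases hf <;> (funext v; simp [pvTr, titleFields])))
      rw [hbf]
      simp only [List.filterMap_append]
      rw [List.filterMap_append] at hA
      rw [hA, hB, List.filterMap_append]
    · intro f hf
      apply pvContains_false_of_not_mem_keys
      rw [hk4]
      refine pvNotMem_of_sublist (pvKeys_sublist d _ _) ?_
      fin_cases hf <;> decide
  -- phase 6 (copy the untreated pairs)
  have hndl : (d.items.map Prod.fst).Nodup := hnd
  rw [pvDictFold_items d.items s5 hndl, h5]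
  congr 1
  apply List.filter_congr
  intro p _
  congr 1
  rw [PySem.Dict.contains_eq_decide_mem_keys]
  simp only [PySem.Dict.keys]
  simp only [h5]
  rcases hb : (bOrder.filterMap (pvCell d pvTr)).any (fun q => q.1 == p.1) with _ | _
  · simp only [List.any_eq_false, beq_iff_eq] at hb
    simp only [decide_eq_false_iff_not, List.mem_map]
    rintro ⟨q, hq, hq1⟩
    exact hb q hq hq1
  · simp only [List.any_eq_true, beq_iff_eq] at hb
    rcases hb with ⟨q, hq, hq1⟩
    simp only [decide_eq_true_eq, List.mem_map]
    exact ⟨q, hq, hq1⟩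

-- ── B-side lemmas ──

-- the slots-or-queue routing of B's first loop, split into its two components
def bSlotStep (slots : List (Option String)) (p : String × String) : List (Option String) :=
  match bSlot.get? p.1 with
  | none => slots
  | some i => if p.2 = "" then slots else slots.set i.toNat (some (bTr i p.2))

def bTreatedB (p : String × String) : Bool :=
  (bSlot.get? p.1).isSome && !(p.2 == "")

theorem bFold_split (l : List (String × String)) (slots : List (Option String))
    (rest : List (String × String)) :
    l.foldl bStep (slots, rest)
      = (l.foldl bSlotStep slots, rest ++ l.filter (fun p => !bTreatedB p)) := by
  induction l generalizing slots rest with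
  | nil => simp
  | cons p t ih =>
    rw [List.foldl_cons, List.foldl_cons, List.filter_cons]
    have hb : bStep (slots, rest) p
        = (bSlotStep slots p, if bTreatedB p then rest else rest ++ [p]) := by
      unfold bStep bSlotStep bTreatedB
      cases bSlot.get? p.1 <;> by_cases hv : p.2 = "" <;> simp [hv]
    rw [hb]
    cases ht : bTreatedB p
    · simp only [Bool.not_false, if_true, Bool.false_eq_true, if_false]
      rw [ih]
      simp
    · simp only [if_true, Bool.not_true, Bool.false_eq_true, if_false]
      exact ih _ _

-- what B's slot array holds at position j after the loop
def bVal (d : PySem.Dict String String) (j : Nat) : Option String :=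
  match d.get? (bOrder.getD j "") with
  | some v => if v = "" then none else some (bTr (j : Int) v)
  | none => none

set_option maxHeartbeats 2000000 in
theorem bSlot_spec (g : String) (i : Int) (h : bSlot.get? g = some i) :
    ∃ jn : Nat, i = (jn : Int) ∧ jn < 11 ∧ bOrder.getD jn "" = g := by
  have hB : bSlot = PySem.Dict.mk [("first_name",(0:Int)), ("last_name",1),
    ("emergency_contact_name",2), ("emergency_contact_relationship",3), ("email",4),
    ("phone_number",5), ("admission_number",6), ("roll_number",7), ("previous_school",8),
    ("address",9), ("medical_conditions",10)] := by decide
  rw [hB] at h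
  simp only [PySem.Dict.get?_mk_cons, beq_iff_eq] at h
  split_ifs at h with h0 h1 h2 h3 h4 h5 h6 h7 h8 h9 h10
  · exact ⟨0, by injection h with h; omega, by omega, by rw [← h0]; rfl⟩
  · exact ⟨1, by injection h with h; omega, by omega, by rw [← h1]; rfl⟩
  · exact ⟨2, by injection h with h; omega, by omega, by rw [← h2]; rfl⟩
  · exact ⟨3, by injection h with h; omega, by omega, by rw [← h3]; rfl⟩
  · exact ⟨4, by injection h with h; omega, by omega, by rw [← h4]; rfl⟩
  · exact ⟨5, by injection h with h; omega, by omega, by rw [← h5]; rfl⟩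
  · exact ⟨6, by injection h with h; omega, by omega, by rw [← h6]; rfl⟩
  · exact ⟨7, by injection h with h; omega, by omega, by rw [← h7]; rfl⟩
  · exact ⟨8, by injection h with h; omega, by omega, by rw [← h8]; rfl⟩
  · exact ⟨9, by injection h with h; omega, by omega, by rw [← h9]; rfl⟩
  · exact ⟨10, by injection h with h; omega, by omega, by rw [← h10]; rfl⟩
  · cases h

theorem bSlots_len (l : List (String × String)) (slots : List (Option String)) :
    (l.foldl bSlotStep slots).length = slots.length := by
  induction l generalizing slots with
  | nil => rfl
  | cons p t ih =>
    rw [List.foldl_cons, ih]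
    unfold bSlotStep
    cases bSlot.get? p.1 with
    | none => rfl
    | some i => by_cases hv : p.2 = "" <;> simp [hv, List.length_set]

theorem pvGet?_eq_find? (d : PySem.Dict String String) (f : String) :
    d.get? f = (d.items.find? (fun p => p.1 == f)).map Prod.snd := by
  obtain ⟨l⟩ := d
  induction l with
  | nil => rfl
  | cons p t ih =>
    rw [PySem.Dict.get?_mk_cons, List.find?_cons]
    by_cases h : p.1 == f
    · simp [h]
    · simp only [h]
      simpa using ih

theorem bSlots_get (l : List (String × String)) (slots : List (Option String))
    (hlen : slots.length = 11) (hnd : (l.map Prod.fst).Nodup)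
    (j : Nat) (hj : j < 11) (f : String) (hf : bSlot.get? f = some (j : Int)) :
    (l.foldl bSlotStep slots).getD j none
      = match l.find? (fun p => p.1 == f) with
        | some p => if p.2 = "" then slots.getD j none else some (bTr (j : Int) p.2)
        | none => slots.getD j none := by
  induction l generalizing slots with
  | nil => simp
  | cons p t ih =>
    rw [List.map_cons, List.nodup_cons] at hnd
    rw [List.foldl_cons, List.find?_cons]
    by_cases hpf : p.1 = f
    · have hpb : (p.1 == f) = true := by simp [hpf]
      simp only [hpb]
      have hget : bSlot.get? p.1 = some (j : Int) := by rw [hpf]; exact hf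
      have hfind : t.find? (fun q => q.1 == f) = none := by
        rw [List.find?_eq_none]
        intro q hq
        simp only [beq_iff_eq]
        intro hqf
        exact hnd.1 (by rw [hpf, ← hqf]; exact List.mem_map_of_mem hq)
      by_cases hv : p.2 = ""
      · simp only [bSlotStep, hget, hv, if_true]
        rw [ih slots hlen hnd.2, hfind]
      · simp only [bSlotStep, hget, hv, if_false]
        have hjt : ((j : Int)).toNat = j := by omega
        rw [hjt]
        rw [ih _ (by rw [List.length_set]; exact hlen) hnd.2, hfind]
        simp [List.getD_eq_getElem?_getD, hlen, hj]
    · have hpb : (p.1 == f) = false := by simp [hpf]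
      simp only [hpb]
      have hstep : (bSlotStep slots p).getD j none = slots.getD j none ∧
          (bSlotStep slots p).length = slots.length := by
        unfold bSlotStep
        cases hg : bSlot.get? p.1 with
        | none => exact ⟨rfl, rfl⟩
        | some i =>
          by_cases hv : p.2 = ""
          · simp [hv]
          · obtain ⟨jn, hi, hjn, hbo⟩ := bSlot_spec p.1 i hg
            obtain ⟨jn', hi', _, hbo'⟩ := bSlot_spec f _ hf
            have hne : i.toNat ≠ j := by
              intro hc
              have h1 : jn = j := by omega
              have h2 : jn' = j := by omega
              exact hpf (by rw [← hbo, h1, ← h2, hbo'])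
            simp [hv, List.getD_eq_getElem?_getD, List.getElem?_set_ne hne, List.length_set]
      rw [ih (bSlotStep slots p) (hstep.2.trans hlen) hnd.2, hstep.1]

theorem bOut_fold_eq (L : List (Int × Option String)) (o : PySem.Dict String String) :
    L.foldl (fun o q => match q.2 with
        | some s => o.insert ((PySem.List.pyGet? bOrder q.1).getD "") s
        | none => o) o
      = (L.filterMap (fun q => q.2.map
          (fun s => (((PySem.List.pyGet? bOrder q.1).getD ""), s)))).foldl
          (fun o p => o.insert p.1 p.2) o := by
  induction L generalizing o with
  | nil => rfl
  | cons q t ih =>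
    rw [List.foldl_cons, List.filterMap_cons]
    cases q.2 <;> simp [ih]

theorem bSlot_isSome_of_mem {g : String} (hg : g ∈ bOrder) : (bSlot.get? g).isSome := by
  fin_cases hg <;> decide

-- slot j's contribution to the output is exactly field _ORDER[j]'s canonical cell
theorem bCell (d : PySem.Dict String String) (i : Int) (j : Nat) (hi : i = (j : Int))
    (f : String) (hfk : bOrder.getD j "" = f) (hj : j < 11) :
    (bVal d j).map (fun s => ((PySem.List.pyGet? bOrder i).getD "", s))
      = pvCell d pvTr f := by
  subst hi hfk
  have key : ∀ (j : Nat) (f : String) (tf : String → String),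
      bOrder.getD j "" = f →
      ((PySem.List.pyGet? bOrder (j : Int)).getD "") = f →
      (∀ v, bTr (j : Int) v = tf v) → (∀ v, pvTr f v = tf v) →
      (bVal d j).map (fun s => ((PySem.List.pyGet? bOrder (j : Int)).getD "", s))
        = pvCell d pvTr f := by
    intro j f tf h1 h2 h3 h4
    unfold bVal
    rw [h1, h2]
    cases hv : d.get? f with
    | none => simp [pvCell, hv]
    | some v => by_cases he : v = "" <;> simp [pvCell, hv, he, h3, h4]
  interval_cases j
  · exact key 0 "first_name" _ rfl (by decide) (fun v => rfl) (fun v => rfl)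
  · exact key 1 "last_name" _ rfl (by decide) (fun v => rfl) (fun v => rfl)
  · exact key 2 "emergency_contact_name" _ rfl (by decide) (fun v => rfl) (fun v => rfl)
  · exact key 3 "emergency_contact_relationship" _ rfl (by decide) (fun v => rfl) (fun v => rfl)
  · exact key 4 "email" _ rfl (by decide) (fun v => rfl) (fun v => rfl)
  · exact key 5 "phone_number" _ rfl (by decide) (fun v => rfl) (fun v => rfl)
  · exact key 6 "admission_number" _ rfl (by decide) (fun v => rfl) (fun v => rfl)
  · exact key 7 "roll_number" _ rfl (by decide) (fun v => rfl) (fun v => rfl)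
  · exact key 8 "previous_school" _ rfl (by decide) (fun v => rfl) (fun v => rfl)
  · exact key 9 "address" _ rfl (by decide) (fun v => rfl) (fun v => rfl)
  · exact key 10 "medical_conditions" _ rfl (by decide) (fun v => rfl) (fun v => rfl)

-- on an item of the dict, "some treated pair has my key" is exactly B's routing test
theorem pvAny_treated (d : PySem.Dict String String) (hnd : d.keys.Nodup)
    (p : String × String) (hp : p ∈ d.items) :
    (pvTreated d).any (fun q => q.1 == p.1) = bTreatedB p := by
  obtain ⟨k, w⟩ := p
  have hv : d.get? k = some w := PySem.Dict.get?_of_mem_items d hp hnd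
  unfold bTreatedB
  simp only
  cases hg : bSlot.get? k with
  | none =>
    have hmem : k ∉ bOrder := by
      intro hm
      have := bSlot_isSome_of_mem hm
      rw [hg] at this
      cases this
    simp only [Option.isSome_none, Bool.false_and]
    rw [List.any_eq_false]
    intro q hq
    simp only [beq_iff_eq]
    intro hq1
    rcases List.mem_filterMap.mp hq with ⟨g, hgmem, hcell⟩
    exact hmem (by rw [← hq1, pvCell_eq_some d pvTr hcell]; exact hgmem)
  | some i =>
    obtain ⟨jn, _, hjn, hbo⟩ := bSlot_spec k i hg
    have hmem : k ∈ bOrder := by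
      rw [← hbo]
      rw [List.getD_eq_getElem?_getD, List.getElem?_eq_getElem (by simp [bOrder]; omega)]
      exact List.getElem_mem _
    simp only [Option.isSome_some, Bool.true_and]
    by_cases he : w = ""
    · have hcell : pvCell d pvTr k = none := by simp [pvCell, hv, he]
      simp only [he, BEq.rfl, Bool.not_true]
      rw [List.any_eq_false]
      intro q hq
      simp only [beq_iff_eq]
      intro hq1
      rcases List.mem_filterMap.mp hq with ⟨g, _, hc⟩
      rw [pvCell_eq_some d pvTr hc] at hq1
      rw [hq1, hcell] at hc
      cases hc
    · have hcell : pvCell d pvTr k = some (k, pvTr k w) := by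
        simp [pvCell, hv, he]
      have hmem2 : (k, pvTr k w) ∈ pvTreated d :=
        List.mem_filterMap.mpr ⟨k, hmem, hcell⟩
      have hne : (w == "") = false := by simpa using he
      rw [hne, Bool.not_false]
      rw [List.any_eq_true]
      exact ⟨_, hmem2, by simp⟩

-- B computes the canonical result
theorem pvB_eq_canonical (data : List (String × String)) :
    sanitize_student_data_alt data
      = pvTreated (PySem.Dict.ofList data) ++ pvRest (PySem.Dict.ofList data) := by
  simp only [sanitize_student_data_alt]
  set d := PySem.Dict.ofList data with hd
  have hnd : d.keys.Nodup := PySem.Dict.nodup_keys_ofList data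
  have hndl : (d.items.map Prod.fst).Nodup := hnd
  have hlen0 : (List.replicate bOrder.length (none : Option String)).length = 11 := by decide
  rw [bFold_split]
  simp only [List.nil_append]
  set S := d.items.foldl bSlotStep (List.replicate bOrder.length none) with hSdef
  set F := d.items.filter (fun p => !bTreatedB p) with hFdef
  have hSlen : S.length = 11 := by rw [hSdef, bSlots_len]; exact hlen0
  have hget : ∀ j : Nat, j < 11 → S.getD j none = bVal d j := by
    intro j hj
    have hf : bSlot.get? (bOrder.getD j "") = some (j : Int) := by
      interval_cases j <;> decide
    rw [hSdef, bSlots_get _ _ hlen0 hndl j hj _ hf]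
    unfold bVal
    rw [pvGet?_eq_find? d (bOrder.getD j "")]
    cases hfind : d.items.find? (fun p => p.1 == bOrder.getD j "") with
    | none => simp
    | some p =>
      by_cases hv : p.2 = "" <;> simp [hv]
  have hSlist : S = [bVal d 0, bVal d 1, bVal d 2, bVal d 3, bVal d 4, bVal d 5,
      bVal d 6, bVal d 7, bVal d 8, bVal d 9, bVal d 10] := by
    apply List.ext_getElem (by simp [hSlen])
    intro i h1 h2
    have hi : i < 11 := by omega
    have hgd : S[i] = S.getD i none := by
      rw [List.getD_eq_getElem?_getD, List.getElem?_eq_getElem h1]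
      rfl
    rw [hgd, hget i hi]
    interval_cases i <;> rfl
  rw [hSlist]
  have henum : PySem.List.enumerate [bVal d 0, bVal d 1, bVal d 2, bVal d 3, bVal d 4,
      bVal d 5, bVal d 6, bVal d 7, bVal d 8, bVal d 9, bVal d 10]
      = [((0:Int), bVal d 0), (1, bVal d 1), (2, bVal d 2), (3, bVal d 3), (4, bVal d 4),
         (5, bVal d 5), (6, bVal d 6), (7, bVal d 7), (8, bVal d 8), (9, bVal d 9),
         (10, bVal d 10)] := by
    simp [PySem.List.enumerate_cons, PySem.List.enumerate_nil]
  rw [henum, bOut_fold_eq]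
  have hT : ([((0:Int), bVal d 0), (1, bVal d 1), (2, bVal d 2), (3, bVal d 3),
      (4, bVal d 4), (5, bVal d 5), (6, bVal d 6), (7, bVal d 7), (8, bVal d 8),
      (9, bVal d 9), (10, bVal d 10)].filterMap (fun q => q.2.map
        (fun s => (((PySem.List.pyGet? bOrder q.1).getD ""), s)))) = pvTreated d := by
    unfold pvTreated
    simp only [List.filterMap_cons, List.filterMap_nil]
    rw [bCell d 0 0 (by norm_num) "first_name" rfl (by omega),
        bCell d 1 1 (by norm_num) "last_name" rfl (by omega),
        bCell d 2 2 (by norm_num) "emergency_contact_name" rfl (by omega),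
        bCell d 3 3 (by norm_num) "emergency_contact_relationship" rfl (by omega),
        bCell d 4 4 (by norm_num) "email" rfl (by omega),
        bCell d 5 5 (by norm_num) "phone_number" rfl (by omega),
        bCell d 6 6 (by norm_num) "admission_number" rfl (by omega),
        bCell d 7 7 (by norm_num) "roll_number" rfl (by omega),
        bCell d 8 8 (by norm_num) "previous_school" rfl (by omega),
        bCell d 9 9 (by norm_num) "address" rfl (by omega),
        bCell d 10 10 (by norm_num) "medical_conditions" rfl (by omega)]
    conv_rhs => rw [show bOrder = ["first_name", "last_name", "emergency_contact_name",
      "emergency_contact_relationship", "email", "phone_number", "admission_number",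
      "roll_number", "previous_school", "address", "medical_conditions"] from rfl]
    simp only [List.filterMap_cons, List.filterMap_nil]
  rw [hT]
  have hF : F = pvRest d := by
    rw [hFdef]
    unfold pvRest
    apply List.filter_congr
    intro p hp
    rw [pvAny_treated d hnd p hp]
  have hTnd : ((pvTreated d).map Prod.fst).Nodup :=
    (pvKeys_sublist d pvTr bOrder).nodup (by decide)
  have hOut : ((pvTreated d).foldl (fun o p => o.insert p.1 p.2)
      (PySem.Dict.empty : PySem.Dict String String)).items = pvTreated d := by
    rw [PySem.Dict.items_foldl_insert_fresh (pvTreated d) Prod.fst Prod.snd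
      PySem.Dict.empty (fun p _ => PySem.Dict.contains_empty p.1) hTnd]
    have hei : (PySem.Dict.empty : PySem.Dict String String).items = [] := rfl
    simp [hei]
  have hFnd : (F.map Prod.fst).Nodup :=
    (List.filter_sublist.map Prod.fst).nodup hndl
  have hFresh : ∀ p ∈ F, ((pvTreated d).foldl (fun o p => o.insert p.1 p.2)
      (PySem.Dict.empty : PySem.Dict String String)).contains p.1 = false := by
    intro p hp
    apply pvContains_false_of_not_mem_keys
    simp only [PySem.Dict.keys, hOut]
    rw [hF] at hp
    rcases List.mem_filter.mp hp with ⟨_, hcond⟩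
    simp only [Bool.not_eq_true', List.any_eq_false, beq_iff_eq] at hcond
    intro hm
    rcases List.mem_map.mp hm with ⟨q, hq, hq1⟩
    exact absurd hq1 (by simpa using hcond q hq)
  rw [PySem.Dict.items_foldl_insert_fresh F Prod.fst Prod.snd _ hFresh hFnd, hOut, hF]
  simp

-- ===== VERDICT (by name: the statement is the Claim_ definition above) =====
theorem sanitize_student_data_spec : Claim_equal_sanitize_student_data := by
  intro data _
  show _ = _
  rw [pvA_eq_canonical, pvB_eq_canonical]
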